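-- pv_equiv track=rewrite | github.com/kingbj940429/kim-lee-kwon | programmers/kakao/lv2/이모티콘 할인행사/kbj.py | emoticons_discounted
-- ===== SOURCE A (Python) =====
-- from itertools import product
-- from collections import defaultdict
--
-- def emoticons_discounted(emoticons):
--     discount = [10, 20, 30, 40]
--     result = []
--
--     for coms in product(discount, repeat = len(emoticons)):
--         dic = defaultdict(list)
--         for com, emo in zip(coms, emoticons):
--             dic[com].append(emo)
--
--         result.append(dic)
--
--     return result
-- ===== SOURCE B (Python) =====
-- from collections import defaultdict
--
-- def emoticons_discounted(emoticons):
--     results = [defaultdict(list)]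
--     for emo in emoticons:
--         new_results = []
--         for r in results:
--             for d in (10, 20, 30, 40):
--                 copy = defaultdict(list, {k: v[:] for k, v in r.items()})
--                 copy[d].append(emo)
--                 new_results.append(copy)
--         results = new_results
--     return results
-- ===== Notes on version B (the rewrite author's own statement) =====
-- stated objective: alternative
-- what changed: Replaces itertools.product enumeration followed by per-tuple dict grouping with an incremental construction that extends a list of partial dicts one emoticon at a time (copying each dict for every discount choice).
import Mathlib
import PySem

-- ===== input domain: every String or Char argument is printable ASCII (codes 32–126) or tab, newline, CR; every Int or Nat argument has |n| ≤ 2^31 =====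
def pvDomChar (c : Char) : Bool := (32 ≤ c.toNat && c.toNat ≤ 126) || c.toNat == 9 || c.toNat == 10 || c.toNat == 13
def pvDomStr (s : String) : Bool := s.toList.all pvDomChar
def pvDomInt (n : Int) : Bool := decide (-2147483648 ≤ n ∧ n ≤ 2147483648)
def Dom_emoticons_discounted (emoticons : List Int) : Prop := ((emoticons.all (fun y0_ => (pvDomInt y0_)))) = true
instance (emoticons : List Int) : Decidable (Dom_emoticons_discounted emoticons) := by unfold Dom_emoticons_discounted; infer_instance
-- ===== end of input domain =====

-- B builds the same family of dicts incrementally (one emoticon at a time) instead of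
-- enumerating itertools.product and grouping each tuple; alternative decomposition, same cost.

-- ===== PORT A =====
-- itertools.product([10,20,30,40], repeat = n): leftmost position varies slowest
def pvProduct4 : Nat → List (List Int)
  | 0 => [[]]
  | n+1 => ([10, 20, 30, 40] : List Int).flatMap (fun d => (pvProduct4 n).map (fun rest => d :: rest))

-- dic[com].append(emo) on a defaultdict(list): first matching key gets emo appended,
-- a missing key is created at the end with [emo]
def pvPushA : List (Int × List Int) → Int → Int → List (Int × List Int)
  | [], k, v => [(k, [v])]
  | (k', vs) :: rest, k, v =>
      if k' = k then (k', vs ++ [v]) :: rest else (k', vs) :: pvPushA rest k v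

def emoticons_discounted (emoticons : List Int) : List (List (Int × List Int)) :=
  (pvProduct4 emoticons.length).foldl
    (fun result coms =>
      result ++ [(coms.zip emoticons).foldl (fun dic p => pvPushA dic p.1 p.2) []])
    []

-- ===== PORT B =====
-- copy = defaultdict(list, {k: v[:] ...}); copy[d].append(emo): append emo under key d,
-- creating the key at the end if absent (Lean lists are immutable, so the copy is implicit)
def pvPushB (r : List (Int × List Int)) (k v : Int) : List (Int × List Int) :=
  match r with
  | [] => [(k, [v])]
  | p :: rest => if p.1 = k then (k, p.2 ++ [v]) :: rest else p :: pvPushB rest k v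

def emoticons_discounted_alt (emoticons : List Int) : List (List (Int × List Int)) :=
  emoticons.foldl
    (fun results emo =>
      results.flatMap (fun r => ([10, 20, 30, 40] : List Int).map (fun d => pvPushB r d emo)))
    [[]]

-- ===== PRECONDITION & SPEC =====
def Spec_emoticons_discounted (emoticons : List Int) (out : List (List (Int × List Int))) : Prop := out = emoticons_discounted_alt emoticons
instance (emoticons : List Int) (out : List (List (Int × List Int))) : Decidable (Spec_emoticons_discounted emoticons out) := by unfold Spec_emoticons_discounted; infer_instance

-- ===== CLAIM (what is proved, stated in full; the proofs are below) =====
def Claim_equal_emoticons_discounted : Prop := ∀ (emoticons : List Int), Dom_emoticons_discounted emoticons → Spec_emoticons_discounted emoticons (emoticons_discounted emoticons)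

-- ===== LEMMAS AND PROOFS =====

theorem pvPush_eq (d : List (Int × List Int)) (k v : Int) : pvPushB d k v = pvPushA d k v := by
  induction d with
  | nil => rfl
  | cons p rest ih =>
      obtain ⟨k', vs⟩ := p
      simp only [pvPushA, pvPushB]
      split_ifs with h
      · simp [h]
      · simp [ih]

theorem foldl_concat_map (f : List Int → List (Int × List Int)) :
    ∀ (l : List (List Int)) (acc : List (List (Int × List Int))),
      l.foldl (fun a x => a ++ [f x]) acc = acc ++ l.map f := by
  intro l
  induction l with
  | nil => simp [List.foldl]
  | cons x xs ih => intro acc; simp [List.foldl, ih]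

theorem alt_loop_eq (es : List Int) :
    ∀ (R : List (List (Int × List Int))),
      es.foldl
        (fun results emo =>
          results.flatMap (fun r => ([10, 20, 30, 40] : List Int).map (fun d => pvPushB r d emo)))
        R
      = R.flatMap (fun r =>
          (pvProduct4 es.length).map (fun coms =>
            (coms.zip es).foldl (fun dic p => pvPushA dic p.1 p.2) r)) := by
  induction es with
  | nil => intro R; simp [pvProduct4]
  | cons e es ih =>
      intro R
      simp only [List.foldl_cons, ih, List.length_cons, pvProduct4]
      simp only [List.flatMap_assoc, List.flatMap_map]
      apply List.flatMap_congr
      intro r _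
      simp only [List.map_flatMap, List.map_map]
      apply List.flatMap_congr
      intro d _
      simp [Function.comp, pvPush_eq, List.zip_cons_cons]

-- ===== VERDICT (by name: the statement is the Claim_ definition above) =====
theorem emoticons_discounted_spec : Claim_equal_emoticons_discounted := by
  intro es _
  unfold Spec_emoticons_discounted emoticons_discounted emoticons_discounted_alt
  rw [alt_loop_eq, foldl_concat_map]
  simp
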